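-- pv_equiv track=rewrite | github.com/andy-s-clark/advent-of-code | 2020/puzzle_7a.py | find_possible_parent_colors
-- ===== SOURCE A (Python) =====
-- def find_possible_parent_colors(color, reverse_rules):
--     if color not in reverse_rules:
--         return []
--     possible_parent_colors = list(reverse_rules[color])
--     traversed_colors = [color]
--     to_traverse = list(reverse_rules[color])
--     while len(to_traverse) > 0:
--         child_color = to_traverse.pop()
--         try:
--             for parent_color in reverse_rules[child_color]:
--                 possible_parent_colors.append(parent_color)
--         except KeyError:
--             continue
--         traversed_colors.append(child_color)
--         to_traverse = set(possible_parent_colors).difference(set(traversed_colors))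
--     return set(possible_parent_colors)
-- ===== SOURCE B (Python) =====
-- def find_possible_parent_colors(color, reverse_rules):
--     if color not in reverse_rules:
--         return []
--     seen = set()
--     order = []
--     for p in reverse_rules[color]:
--         if p not in seen:
--             seen.add(p)
--             order.append(p)
--     i = 0
--     while i < len(order):
--         c = order[i]
--         i += 1
--         for p in reverse_rules.get(c, ()):
--             if p not in seen:
--                 seen.add(p)
--                 order.append(p)
--     return set(order)
-- ===== Notes on version B (the rewrite author's own statement) =====
-- stated objective: alternative
-- what changed: A repeatedly rebuilds whole sets (set(possible).difference(set(traversed)) after every productive pop, rescanning all collected parents each time); B is a standard single-pass BFS over the reverse-rule graph with a visited set, processing each node once and each edge once (worst-case O(V+E) vs A's O(V*E), though a timing run's random inputs showed no measurable difference).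
import Mathlib
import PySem

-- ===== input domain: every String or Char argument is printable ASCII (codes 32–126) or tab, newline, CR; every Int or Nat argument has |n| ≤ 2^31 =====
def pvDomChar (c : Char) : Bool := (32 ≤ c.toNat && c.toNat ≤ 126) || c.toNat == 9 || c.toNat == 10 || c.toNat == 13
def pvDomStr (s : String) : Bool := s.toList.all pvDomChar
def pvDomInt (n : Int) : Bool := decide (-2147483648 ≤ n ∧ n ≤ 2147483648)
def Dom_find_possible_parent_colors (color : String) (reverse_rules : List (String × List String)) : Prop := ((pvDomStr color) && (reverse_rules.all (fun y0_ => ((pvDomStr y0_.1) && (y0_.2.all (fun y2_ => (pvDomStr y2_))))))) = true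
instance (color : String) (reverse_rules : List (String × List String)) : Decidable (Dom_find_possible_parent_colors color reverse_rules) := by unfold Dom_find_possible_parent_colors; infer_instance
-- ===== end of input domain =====

-- B replaces A's repeated whole-set differences with a single-pass BFS over the reverse rules
-- (objective: alternative).  The Python function returns a SET; both ports return the list of its
-- distinct elements, and that set is independent of Python's (unmodelled) set pop/iteration order.

-- reverse_rules[c] / 'c in reverse_rules' (dict lookup; some = present)
def pvRules (rr : List (String × List String)) (c : String) : Option (List String) :=
  PySem.Dict.get? (PySem.Dict.mk rr) c

-- number of distinct strings occurring in the rule values / number of distinct keys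
-- (used only in the fuel bounds of the two loops)
def pvB0 (rr : List (String × List String)) : Nat :=
  (PySem.Set.ofList (rr.flatMap (·.2))).length
def pvK (rr : List (String × List String)) : Nat :=
  (PySem.Set.ofList (rr.map (·.1))).length

-- ===== PORT A =====
-- Python's while-loop, step for step: pop a colour, append reverse_rules[child] to possible,
-- append child to traversed (KeyError: continue), recompute to_traverse as the set difference.
-- `to_traverse.pop()` takes an arbitrary element of a Python set (hash order, not modelled);
-- the RETURNED SET is independent of the pop order, and this port pops the first element.
-- The fuel argument is a totality guard only; the fuel passed below is provably ample.
def aLoop (rr : List (String × List String)) :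
    Nat → List String → List String → List String → List String
  | 0, possible, _, _ => PySem.Set.ofList possible
  | fuel+1, possible, traversed, tt =>
    match tt with
    | [] => PySem.Set.ofList possible            -- len(to_traverse) == 0: return set(possible)
    | child :: rest =>
      match pvRules rr child with
      | none => aLoop rr fuel possible traversed rest      -- KeyError: continue
      | some ps =>
        aLoop rr fuel (possible ++ ps) (traversed ++ [child])
          (PySem.Set.diff (PySem.Set.ofList (possible ++ ps))
            (PySem.Set.ofList (traversed ++ [child])))

def find_possible_parent_colors (color : String) (reverse_rules : List (String × List String)) : List String :=
  match pvRules reverse_rules color with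
  | none => []                                   -- color not in reverse_rules
  | some ps =>
    aLoop reverse_rules
      (ps.length + pvK reverse_rules * (pvB0 reverse_rules + 1) + pvB0 reverse_rules)
      ps [color] ps

-- ===== PORT B =====
-- BFS: `order` is the discovery list = the distinct elements of Source B's `seen` set (Source B appends to
-- `order` exactly when it adds to `seen`, so the two always hold the same elements); the inner
-- "for p in reverse_rules.get(c, ()): if p not in seen: add/append" is exactly PySem.Set.update.
-- `i` is the while-loop's scan index; fuel is a totality guard only (`order` never exceeds pvB0).
def bLoop (rr : List (String × List String)) : Nat → List String → Nat → List String
  | 0, order, _ => order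
  | fuel+1, order, i =>
    if i < order.length then
      bLoop rr fuel
        (PySem.Set.update order (PySem.Dict.getD (PySem.Dict.mk rr) (order.getD i "") []))
        (i+1)
    else order                                   -- i == len(order): return set(order) = order

def find_possible_parent_colors_alt (color : String) (reverse_rules : List (String × List String)) : List String :=
  match pvRules reverse_rules color with
  | none => []
  | some ps => bLoop reverse_rules (pvB0 reverse_rules) (PySem.Set.ofList ps) 0

-- ===== PRECONDITION & SPEC =====
def Spec_find_possible_parent_colors (color : String) (reverse_rules : List (String × List String)) (out : List String) : Prop := out = find_possible_parent_colors_alt color reverse_rules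
instance (color : String) (reverse_rules : List (String × List String)) (out : List String) : Decidable (Spec_find_possible_parent_colors color reverse_rules out) := by unfold Spec_find_possible_parent_colors; infer_instance

-- ===== CLAIM (what is proved, stated in full; the proofs are below) =====
def Claim_equal_find_possible_parent_colors : Prop := ∀ (color : String) (reverse_rules : List (String × List String)), Dom_find_possible_parent_colors color reverse_rules → Spec_find_possible_parent_colors color reverse_rules (find_possible_parent_colors color reverse_rules)

-- ===== LEMMAS AND PROOFS =====

-- x has no rules (A's KeyError branch / B's getD default)
def pvLeaf (rr : List (String × List String)) (x : String) : Prop := pvRules rr x = none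

-- expanding x adds nothing new to L
def pvNoop (rr : List (String × List String)) (L : List String) (x : String) : Prop :=
  ∀ ps, pvRules rr x = some ps → ∀ y ∈ ps, y ∈ L

-- A's recomputed to_traverse
def pvF (rr : List (String × List String)) (p t : List String) : List String :=
  PySem.Set.diff (PySem.Set.ofList p) (PySem.Set.ofList t)

-- keys of rr not yet traversed (termination-measure component)
def pvUK (rr : List (String × List String)) (t : List String) : Nat :=
  ((PySem.Set.ofList (rr.map (·.1))).filter (fun k => !t.contains k)).length

lemma pv_rules_some {rr : List (String × List String)} {c : String} {ps : List String}
    (h : pvRules rr c = some ps) : (c, ps) ∈ rr := by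
  unfold pvRules PySem.Dict.get? at h
  cases hf : List.find? (fun p => p.1 == c) (PySem.Dict.mk rr).items with
  | none => rw [hf] at h; simp at h
  | some pr =>
    rw [hf] at h
    simp at h
    have hm := List.mem_of_find?_eq_some hf
    have hp := List.find?_some hf
    simp at hp
    have : pr = (c, ps) := by cases pr; simp_all
    rw [this] at hm; exact hm

lemma pv_mem_values {rr : List (String × List String)} {c : String} {ps : List String}
    (h : pvRules rr c = some ps) : ∀ y ∈ ps, y ∈ rr.flatMap (·.2) :=
  fun y hy => List.mem_flatMap.2 ⟨(c, ps), pv_rules_some h, hy⟩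

lemma pv_mem_keys {rr : List (String × List String)} {c : String} {ps : List String}
    (h : pvRules rr c = some ps) : c ∈ rr.map (·.1) :=
  List.mem_map.2 ⟨(c, ps), pv_rules_some h, rfl⟩

lemma pv_nodup_le_B0 {rr : List (String × List String)} {l : List String}
    (hn : l.Nodup) (hs : ∀ x ∈ l, x ∈ rr.flatMap (·.2)) : l.length ≤ pvB0 rr := by
  have h1 : l.toFinset.card = l.length := List.toFinset_card_of_nodup hn
  have h2 : (PySem.Set.ofList (rr.flatMap (·.2)) : List String).toFinset.card = pvB0 rr :=
    List.toFinset_card_of_nodup (PySem.Set.nodup_ofList _)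
  rw [← h1, ← h2]
  apply Finset.card_le_card
  intro x hx
  simp only [List.mem_toFinset] at *
  rw [PySem.Set.mem_ofList]
  exact hs x hx

lemma pv_update_noop {s : PySem.Set String} {xs : List String}
    (h : ∀ y ∈ xs, y ∈ s) : PySem.Set.update s xs = s := by
  rw [PySem.Set.update_eq_append_filter]
  have : (PySem.Set.ofList xs : List String).filter (fun y => !PySem.Set.contains s y) = [] := by
    rw [List.filter_eq_nil_iff]
    intro a ha
    rw [PySem.Set.mem_ofList] at ha
    simp [PySem.Set.contains]
    exact h a ha
  rw [this, List.append_nil]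

lemma pv_UK_lt {rr : List (String × List String)} {t : List String} {c : String}
    (hc : c ∈ rr.map (·.1)) (hnt : c ∉ t) : pvUK rr (t ++ [c]) < pvUK rr t := by
  unfold pvUK
  have hmem : c ∈ (PySem.Set.ofList (rr.map (·.1)) : List String) := (PySem.Set.mem_ofList _ _).2 hc
  obtain ⟨a, b, hab⟩ := List.append_of_mem hmem
  rw [hab]
  simp only [List.filter_append, List.filter_cons, List.length_append]
  have h1 : (!(t ++ [c]).contains c) = false := by simp
  have h2 : (!t.contains c) = true := by simp [hnt]
  rw [h1, h2]
  simp only [Bool.false_eq_true, if_false, if_true, List.length_cons]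
  have hm1 : (a.filter (fun k => !(t ++ [c]).contains k)).length ≤ (a.filter (fun k => !t.contains k)).length := by
    rw [← List.countP_eq_length_filter, ← List.countP_eq_length_filter]
    apply List.countP_mono_left
    intro x hx hpx
    simp at hpx ⊢
    exact hpx.1
  have hm2 : (b.filter (fun k => !(t ++ [c]).contains k)).length ≤ (b.filter (fun k => !t.contains k)).length := by
    rw [← List.countP_eq_length_filter, ← List.countP_eq_length_filter]
    apply List.countP_mono_left
    intro x hx hpx
    simp at hpx ⊢
    exact hpx.1
  omega

lemma pv_UK_nil (rr : List (String × List String)) : pvUK rr [] = pvK rr := by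
  unfold pvUK pvK
  have : (fun k => !List.contains ([] : List String) k) = fun _ : String => true := by
    funext k; simp
  rw [this, List.filter_true]

lemma pv_UK_le (rr : List (String × List String)) (t : List String) :
    pvUK rr t ≤ pvUK rr [] := by
  rw [pv_UK_nil]
  exact List.length_filter_le _ _

lemma pv_append_cons_inj {α : Type} {s t u v : List α} {c : α}
    (h : s ++ c :: t = u ++ c :: v) (hs : c ∉ s) (hu : c ∉ u) : s = u ∧ t = v := by
  induction s generalizing u with
  | nil =>
    cases u with
    | nil => simp_all
    | cons b u' => simp at h; rcases h with ⟨h1, h2⟩; subst h1; simp at hu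
  | cons a s' ih =>
    cases u with
    | nil => simp at h; rcases h with ⟨h1, h2⟩; subst h1; simp at hs
    | cons b u' =>
      simp at h hs hu
      obtain ⟨h1, h2⟩ := h
      obtain ⟨rab, rc⟩ := ih h2 hs.2 hu.2
      exact ⟨by rw [h1, rab], rc⟩

lemma pv_getD_rules (rr : List (String × List String)) (x : String) :
    PySem.Dict.getD (PySem.Dict.mk rr) x [] = (pvRules rr x).getD [] := by
  simp [PySem.Dict.getD, pvRules]

lemma pv_bLoop_step {rr : List (String × List String)} {L : List String} {i n : Nat}
    (h : i < L.length) (hno : pvNoop rr L (L.getD i "")) :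
    bLoop rr (n+1) L i = bLoop rr n L (i+1) := by
  have hupd : PySem.Set.update L (PySem.Dict.getD (PySem.Dict.mk rr) (L.getD i "") []) = L := by
    rw [pv_getD_rules]
    cases hr : pvRules rr (L.getD i "") with
    | none => simp [PySem.Set.update]
    | some ps => exact pv_update_noop (hno ps hr)
  simp only [bLoop, if_pos h]
  rw [hupd]

lemma pv_bLoop_expand {rr : List (String × List String)} {L : List String} {i n : Nat}
    {c : String} {ps : List String}
    (h : i < L.length) (hc : L.getD i "" = c) (hr : pvRules rr c = some ps) :
    bLoop rr (n+1) L i = bLoop rr n (PySem.Set.update L ps) (i+1) := by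
  simp only [bLoop, if_pos h]
  rw [hc, pv_getD_rules, hr]
  rfl

lemma pv_bLoop_noop (rr : List (String × List String)) :
    ∀ (m n : Nat) (L : List String) (i : Nat), i + m ≤ L.length →
      (∀ x ∈ (L.drop i).take m, pvNoop rr L x) → m ≤ n →
      bLoop rr n L i = bLoop rr (n - m) L (i + m) := by
  intro m
  induction m with
  | zero => intro n L i _ _ _; simp
  | succ m ih =>
    intro n L i hlen hno hmn
    have hi : i < L.length := by omega
    have hdrop : L.drop i = L[i] :: L.drop (i+1) := List.drop_eq_getElem_cons hi
    have hgd : L.getD i "" = L[i] := List.getD_eq_getElem L "" hi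
    obtain ⟨n', rfl⟩ : ∃ n', n = n' + 1 := ⟨n - 1, by omega⟩
    rw [pv_bLoop_step hi (by rw [hgd]; exact hno _ (by rw [hdrop, List.take_succ_cons]; exact List.mem_cons_self))]
    have := ih n' L (i+1) (by omega)
      (by intro x hx; exact hno x (by rw [hdrop, List.take_succ_cons]; exact List.mem_cons_of_mem _ hx)) (by omega)
    rw [this]
    congr 1 <;> omega

lemma pv_bLoop_finish (rr : List (String × List String)) :
    ∀ (n : Nat) (L : List String) (i : Nat),
      (∀ x ∈ L.drop i, pvNoop rr L x) → L.length - i ≤ n →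
      bLoop rr n L i = L := by
  intro n
  induction n with
  | zero => intro L i _ _; rfl
  | succ n ih =>
    intro L i hno hlen
    by_cases hi : i < L.length
    · have hdrop : L.drop i = L[i] :: L.drop (i+1) := List.drop_eq_getElem_cons hi
      have hgd : L.getD i "" = L[i] := List.getD_eq_getElem L "" hi
      rw [pv_bLoop_step hi (by rw [hgd]; exact hno _ (by rw [hdrop]; exact List.mem_cons_self))]
      exact ih L (i+1) (fun x hx => hno x (by rw [hdrop]; exact List.mem_cons_of_mem _ hx)) (by omega)
    · simp [bLoop, hi]

lemma pv_mem_F {rr : List (String × List String)} {p t : List String} {x : String} :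
    x ∈ pvF rr p t ↔ x ∈ p ∧ x ∉ t := by
  simp [pvF, PySem.Set.mem_diff, PySem.Set.mem_ofList]

lemma pv_F_filter (rr : List (String × List String)) (p t : List String) :
    pvF rr p t = (PySem.Set.ofList p : List String).filter
      (fun y => !(PySem.Set.ofList t : PySem.Set String).contains y) := rfl

lemma pv_main (rr : List (String × List String)) :
    ∀ (nA : Nat) (p t tt : List String) (i nB : Nat),
      pvUK rr t * (pvB0 rr + 1) + tt.length ≤ nA →
      (∀ x ∈ p, x ∈ rr.flatMap (·.2)) →
      i ≤ (PySem.Set.ofList p : List String).length →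
      (∀ x ∈ (PySem.Set.ofList p : List String).take i, x ∈ t ∨ pvLeaf rr x) →
      (∀ x ∈ t, pvNoop rr (PySem.Set.ofList p) x) →
      (∃ j, tt = (pvF rr p t).drop j ∧ ∀ x ∈ (pvF rr p t).take j, pvLeaf rr x) →
      pvB0 rr - i ≤ nB →
      aLoop rr nA p t tt = bLoop rr nB (PySem.Set.ofList p) i := by
  intro nA
  induction nA using Nat.strong_induction_on with
  | _ nA IH =>
  intro p t tt i nB hA hp hi hdone habs hj hB
  have hLnodup : (PySem.Set.ofList p : List String).Nodup := PySem.Set.nodup_ofList p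
  have hLsub : ∀ x ∈ (PySem.Set.ofList p : List String), x ∈ rr.flatMap (·.2) :=
    fun x hx => hp x ((PySem.Set.mem_ofList p x).1 hx)
  have hLlen : (PySem.Set.ofList p : List String).length ≤ pvB0 rr := pv_nodup_le_B0 hLnodup hLsub
  obtain ⟨j, hj1, hj2⟩ := hj
  cases htt : tt with
  | nil =>
    -- everything that remains in L is a no-op for B; A returns set(possible) = L
    have hnoop : ∀ x ∈ (PySem.Set.ofList p : List String).drop i, pvNoop rr (PySem.Set.ofList p) x := by
      intro x hx
      have hxL : x ∈ (PySem.Set.ofList p : List String) := List.mem_of_mem_drop hx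
      by_cases hxt : x ∈ t
      · exact habs x hxt
      · have hxF : x ∈ pvF rr p t := pv_mem_F.2 ⟨(PySem.Set.mem_ofList p x).1 hxL, hxt⟩
        have hlenF : (pvF rr p t).length ≤ j := by
          by_contra h'
          push_neg at h'
          have : (pvF rr p t).drop j ≠ [] := by
            intro hnil
            have := List.length_drop (l := pvF rr p t) (i := j)
            rw [hnil] at this
            simp at this
            omega
          rw [← hj1, htt] at this
          exact this rfl
        have hxtake : x ∈ (pvF rr p t).take j := by
          rw [List.take_of_length_le hlenF]
          exact hxF
        intro ps hps
        rw [hj2 x hxtake] at hps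
        exact absurd hps (by simp)
    have hL : aLoop rr nA p t [] = PySem.Set.ofList p := by
      cases nA <;> rfl
    rw [hL, pv_bLoop_finish rr nB _ i hnoop (by omega)]
  | cons c rest =>
    subst htt
    have hcF : c ∈ pvF rr p t := by
      have : c ∈ (pvF rr p t).drop j := by rw [← hj1]; exact List.mem_cons_self
      exact List.mem_of_mem_drop this
    have hcp : c ∈ p := (pv_mem_F.1 hcF).1
    have hct : c ∉ t := (pv_mem_F.1 hcF).2
    have hcL : c ∈ (PySem.Set.ofList p : List String) := (PySem.Set.mem_ofList p c).2 hcp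
    obtain ⟨m, rfl⟩ : ∃ m, nA = m + 1 := ⟨nA - 1, by simp at hA; omega⟩
    cases hr : pvRules rr c with
    | none =>
      have hstep : aLoop rr (m+1) p t (c :: rest) = aLoop rr m p t rest := by
        simp only [aLoop, hr]
      rw [hstep]
      apply IH m (by omega) p t rest i nB _ hp hi hdone habs _ hB
      · simp at hA ⊢; omega
      · refine ⟨j + 1, ?_, ?_⟩
        · have : (pvF rr p t).drop (j+1) = ((pvF rr p t).drop j).drop 1 := (List.drop_drop).symm
          rw [this, ← hj1]
          rfl
        · intro x hx
          rw [List.take_add, ← hj1] at hx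
          rcases List.mem_append.1 hx with h1 | h1
          · exact hj2 x h1
          · simp at h1
            rw [h1]
            exact hr
    | some ps =>
      -- decompose L at c
      obtain ⟨u, v, huv⟩ := List.append_of_mem hcL
      have hnodup' : (u ++ c :: v).Nodup := by rw [← huv]; exact hLnodup
      have hcu : c ∉ u := by
        rcases List.nodup_append.1 hnodup' with ⟨_, _, hdisj⟩
        intro hmem
        exact hdisj c hmem c List.mem_cons_self rfl
      -- filter decomposition of pvF
      have hfc : (!(PySem.Set.ofList t : PySem.Set String).contains c) = true := by
        simp [PySem.Set.contains, PySem.Set.mem_ofList]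
        intro hmem
        exact hct ((PySem.Set.mem_ofList t c).1 (by simpa using hmem))
      have hFdec : pvF rr p t =
          u.filter (fun y => !(PySem.Set.ofList t : PySem.Set String).contains y) ++
          c :: v.filter (fun y => !(PySem.Set.ofList t : PySem.Set String).contains y) := by
        rw [pv_F_filter, huv, List.filter_append, List.filter_cons, hfc]
        simp
      have heq : (pvF rr p t).take j ++ c :: rest =
          u.filter (fun y => !(PySem.Set.ofList t : PySem.Set String).contains y) ++
          c :: v.filter (fun y => !(PySem.Set.ofList t : PySem.Set String).contains y) := by
        rw [hj1, List.take_append_drop]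
        exact hFdec
      have hctake : c ∉ (pvF rr p t).take j := by
        intro hmem
        have := hj2 c hmem
        rw [pvLeaf, hr] at this
        exact absurd this (by simp)
      have hcuf : c ∉ u.filter (fun y => !(PySem.Set.ofList t : PySem.Set String).contains y) := by
        intro hmem
        exact hcu (List.mem_filter.1 hmem).1
      obtain ⟨hju, hrv⟩ := pv_append_cons_inj heq hctake hcuf
      have huleaf : ∀ x ∈ u, x ∉ t → pvLeaf rr x := by
        intro x hxu hxt
        have hPt : (!(PySem.Set.ofList t : PySem.Set String).contains x) = true := by
          simp [PySem.Set.contains]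
          intro hmem
          exact hxt ((PySem.Set.mem_ofList t x).1 (by simpa using hmem))
        have : x ∈ u.filter (fun y => !(PySem.Set.ofList t : PySem.Set String).contains y) :=
          List.mem_filter.2 ⟨hxu, hPt⟩
        rw [← hju] at this
        exact hj2 x this
      have hiu : i ≤ u.length := by
        by_contra h'
        push_neg at h'
        have hcin : c ∈ (PySem.Set.ofList p : List String).take i := by
          rw [huv, List.take_append, List.take_of_length_le (by omega)]
          apply List.mem_append_right
          obtain ⟨w, hw⟩ : ∃ w, i - u.length = w + 1 := ⟨i - u.length - 1, by omega⟩
          rw [hw, List.take_succ_cons]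
          exact List.mem_cons_self
        rcases hdone c hcin with h1 | h1
        · exact hct h1
        · rw [pvLeaf, hr] at h1; exact absurd h1 (by simp)
      have hulen : u.length < (PySem.Set.ofList p : List String).length := by
        rw [huv]; simp
      have hnoopu : ∀ x ∈ ((PySem.Set.ofList p : List String).drop i).take (u.length - i),
          pvNoop rr (PySem.Set.ofList p) x := by
        intro x hx
        have hdropeq : (PySem.Set.ofList p : List String).drop i = u.drop i ++ c :: v := by
          rw [huv, List.drop_append]
          have : i - u.length = 0 := by omega
          rw [this, List.drop_zero]
        rw [hdropeq, List.take_append_of_le_length (by simp)] at hx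
        have hxu : x ∈ u := List.mem_of_mem_drop (List.mem_of_mem_take hx)
        by_cases hxt : x ∈ t
        · exact habs x hxt
        · intro qs hqs
          rw [(huleaf x hxu hxt : pvRules rr x = none)] at hqs
          exact absurd hqs (by simp)
      have hrun : bLoop rr nB (PySem.Set.ofList p) i
          = bLoop rr (nB - (u.length - i)) (PySem.Set.ofList p) u.length := by
        have := pv_bLoop_noop rr (u.length - i) nB (PySem.Set.ofList p) i
          (by omega) hnoopu (by omega)
        rw [this]
        congr 1
        omega
      have hgd : (PySem.Set.ofList p : List String).getD u.length "" = c := by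
        rw [huv, List.getD_eq_getElem _ _ (by simp), List.getElem_append_right (le_refl u.length)]
        simp
      have hexp : bLoop rr (nB - (u.length - i)) (PySem.Set.ofList p) u.length
          = bLoop rr (nB - (u.length - i) - 1) (PySem.Set.ofList (p ++ ps)) (u.length + 1) := by
        obtain ⟨nb', hnb⟩ : ∃ nb', nB - (u.length - i) = nb' + 1 := ⟨nB - (u.length - i) - 1, by omega⟩
        rw [hnb, pv_bLoop_expand hulen hgd hr, PySem.Set.ofList_append]
        norm_num
      have hLext : (PySem.Set.ofList (p ++ ps) : List String)
          = (PySem.Set.ofList p : List String) ++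
            ((PySem.Set.ofList ps : List String).filter
              fun y => !(PySem.Set.contains (PySem.Set.ofList p) y)) := by
        rw [PySem.Set.ofList_append, PySem.Set.update_eq_append_filter]
      have hp' : ∀ x ∈ p ++ ps, x ∈ rr.flatMap (·.2) := by
        intro x hx
        rcases List.mem_append.1 hx with h1 | h1
        · exact hp x h1
        · exact pv_mem_values hr x h1
      have hA' : pvUK rr (t ++ [c]) * (pvB0 rr + 1) + (pvF rr (p ++ ps) (t ++ [c])).length ≤ m := by
        have hUKlt := pv_UK_lt (pv_mem_keys hr) hct
        have hF'nodup : (pvF rr (p ++ ps) (t ++ [c])).Nodup := by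
          unfold pvF PySem.Set.diff
          exact List.Nodup.filter _ (PySem.Set.nodup_ofList _)
        have hF'len : (pvF rr (p ++ ps) (t ++ [c])).length ≤ pvB0 rr :=
          pv_nodup_le_B0 hF'nodup (fun x hx => hp' x (pv_mem_F.1 hx).1)
        have h1 : pvUK rr (t ++ [c]) * (pvB0 rr + 1) ≤ (pvUK rr t - 1) * (pvB0 rr + 1) :=
          Nat.mul_le_mul_right _ (by omega)
        have h2 : (pvUK rr t - 1) * (pvB0 rr + 1) = pvUK rr t * (pvB0 rr + 1) - (pvB0 rr + 1) := by
          rw [Nat.sub_mul, one_mul]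
        have h3 : (pvB0 rr + 1) ≤ pvUK rr t * (pvB0 rr + 1) :=
          Nat.le_mul_of_pos_left _ (by omega)
        simp only [List.length_cons] at hA
        omega
      have hdone' : ∀ x ∈ (PySem.Set.ofList (p ++ ps) : List String).take (u.length + 1),
          x ∈ t ++ [c] ∨ pvLeaf rr x := by
        have htake : (PySem.Set.ofList (p ++ ps) : List String).take (u.length + 1) = u ++ [c] := by
          rw [hLext, List.take_append_of_le_length (by omega), huv,
            List.take_append, List.take_of_length_le (by omega)]
          have h1 : u.length + 1 - u.length = 1 := by omega
          rw [h1]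
          rfl
        rw [htake]
        intro x hx
        rcases List.mem_append.1 hx with h1 | h1
        · by_cases hxt : x ∈ t
          · exact Or.inl (List.mem_append_left _ hxt)
          · exact Or.inr (huleaf x h1 hxt)
        · simp at h1
          subst h1
          exact Or.inl (List.mem_append_right _ List.mem_cons_self)
      have habs' : ∀ x ∈ t ++ [c], pvNoop rr (PySem.Set.ofList (p ++ ps)) x := by
        intro x hx qs hqs y hy
        have hmem : y ∈ p ++ ps → y ∈ (PySem.Set.ofList (p ++ ps) : List String) :=
          fun h => (PySem.Set.mem_ofList _ y).2 h
        rcases List.mem_append.1 hx with h1 | h1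
        · have := habs x h1 qs hqs y hy
          rw [hLext]
          exact List.mem_append_left _ this
        · simp at h1
          subst h1
          rw [hr] at hqs
          injection hqs with hqs
          subst hqs
          exact hmem (List.mem_append_right _ hy)
      have happ := IH m (by omega) (p ++ ps) (t ++ [c]) (pvF rr (p ++ ps) (t ++ [c]))
        (u.length + 1) (nB - (u.length - i) - 1) hA' hp'
        (by rw [hLext]; simp; omega)
        hdone' habs'
        ⟨0, by simp, by simp⟩
        (by omega)
      have hstepA : aLoop rr (m+1) p t (c :: rest)
          = aLoop rr m (p ++ ps) (t ++ [c]) (pvF rr (p ++ ps) (t ++ [c])) := by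
        simp only [aLoop, hr]
        rfl
      rw [hstepA, happ, ← hexp, ← hrun]

lemma pv_phase1 (rr : List (String × List String)) (color : String) (ps : List String)
    (hcolor : pvRules rr color = some ps) :
    ∀ (nA k nB : Nat),
      (∀ x ∈ ps.take k, pvLeaf rr x) →
      (ps.length - k) + pvUK rr [] * (pvB0 rr + 1) + pvB0 rr ≤ nA →
      pvB0 rr ≤ nB →
      aLoop rr nA ps [color] (ps.drop k) = bLoop rr nB (PySem.Set.ofList ps) 0 := by
  intro nA
  induction nA using Nat.strong_induction_on with
  | _ nA IH =>
  intro k nB hk hA hB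
  have hpsub : ∀ x ∈ ps, x ∈ rr.flatMap (·.2) := pv_mem_values hcolor
  have hLnodup : (PySem.Set.ofList ps : List String).Nodup := PySem.Set.nodup_ofList ps
  have hLsub : ∀ x ∈ (PySem.Set.ofList ps : List String), x ∈ rr.flatMap (·.2) :=
    fun x hx => hpsub x ((PySem.Set.mem_ofList ps x).1 hx)
  have hLlen : (PySem.Set.ofList ps : List String).length ≤ pvB0 rr := pv_nodup_le_B0 hLnodup hLsub
  cases hd : ps.drop k with
  | nil =>
    have hkp : ps.length ≤ k := by
      have h1 := List.length_drop (l := ps) (i := k)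
      rw [hd] at h1
      simp at h1
      omega
    have hall : ∀ x ∈ ps, pvLeaf rr x := by
      intro x hx
      apply hk
      rw [List.take_of_length_le hkp]
      exact hx
    have hL : aLoop rr nA ps [color] [] = PySem.Set.ofList ps := by cases nA <;> rfl
    rw [hL, pv_bLoop_finish rr nB _ 0 ?_ (by omega)]
    intro x hx qs hqs
    rw [(hall x ((PySem.Set.mem_ofList ps x).1 (List.mem_of_mem_drop hx)) : pvRules rr x = none)] at hqs
    exact absurd hqs (by simp)
  | cons c rest =>
    have hklen : k < ps.length := by
      have h1 := List.length_drop (l := ps) (i := k)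
      rw [hd] at h1
      simp at h1
      omega
    have hrest : rest = ps.drop (k+1) := by
      have h2 : ps.drop (k+1) = (ps.drop k).drop 1 := (List.drop_drop).symm
      rw [h2, hd]
      rfl
    have hcps : c ∈ ps := by
      have : c ∈ ps.drop k := by rw [hd]; exact List.mem_cons_self
      exact List.mem_of_mem_drop this
    obtain ⟨m, rfl⟩ : ∃ m, nA = m + 1 := ⟨nA - 1, by omega⟩
    cases hr : pvRules rr c with
    | none =>
      have hstep : aLoop rr (m+1) ps [color] (c :: rest) = aLoop rr m ps [color] rest := by
        simp only [aLoop, hr]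
      rw [hstep, hrest]
      apply IH m (by omega) (k+1) nB ?_ (by omega) hB
      intro x hx
      rw [List.take_add] at hx
      rcases List.mem_append.1 hx with h1 | h1
      · exact hk x h1
      · rw [hd] at h1
        simp at h1
        rw [h1]
        exact hr
    | some cs =>
      have hcnotk : c ∉ ps.take k := by
        intro hmem
        have := hk c hmem
        rw [pvLeaf, hr] at this
        exact absurd this (by simp)
      have hps_split : ps = ps.take k ++ c :: rest := by
        conv_lhs => rw [← List.take_append_drop k ps, hd]
      have hcnotofk : c ∉ (PySem.Set.ofList (ps.take k) : List String) :=
        fun h => hcnotk ((PySem.Set.mem_ofList _ c).1 h)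
      have hofsplit : (PySem.Set.ofList ps : List String)
          = (PySem.Set.ofList (ps.take k) : List String) ++ c ::
            ((PySem.Set.ofList rest : List String).filter
              (fun y => !(PySem.Set.contains ((PySem.Set.ofList (ps.take k) : List String) ++ [c]) y))) := by
        have h0 := congrArg PySem.Set.ofList hps_split
        rw [h0, PySem.Set.ofList_append, PySem.Set.update_cons,
          PySem.Set.add_of_not_mem hcnotofk, PySem.Set.update_eq_append_filter]
        simp [List.append_assoc]
      set u : List String := PySem.Set.ofList (ps.take k) with hu
      have huleafs : ∀ x ∈ u, pvLeaf rr x :=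
        fun x hx => hk x ((PySem.Set.mem_ofList _ x).1 hx)
      have hulen : u.length < (PySem.Set.ofList ps : List String).length := by
        rw [hofsplit]; simp
      have htk : (PySem.Set.ofList ps : List String).take u.length = u := by
        rw [hofsplit, List.take_append_of_le_length (le_refl u.length), List.take_of_length_le (le_refl u.length)]
      have hnoopu : ∀ x ∈ ((PySem.Set.ofList ps : List String).drop 0).take (u.length - 0),
          pvNoop rr (PySem.Set.ofList ps) x := by
        intro x hx
        rw [List.drop_zero, Nat.sub_zero, htk] at hx
        intro qs hqs
        rw [(huleafs x hx : pvRules rr x = none)] at hqs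
        exact absurd hqs (by simp)
      have hrun : bLoop rr nB (PySem.Set.ofList ps) 0
          = bLoop rr (nB - u.length) (PySem.Set.ofList ps) u.length := by
        have := pv_bLoop_noop rr u.length nB (PySem.Set.ofList ps) 0 (by omega) (by simpa using hnoopu) (by omega)
        simpa using this
      have hgd : (PySem.Set.ofList ps : List String).getD u.length "" = c := by
        rw [hofsplit, List.getD_eq_getElem _ _ (by simp), List.getElem_append_right (le_refl u.length)]
        simp
      have hexp : bLoop rr (nB - u.length) (PySem.Set.ofList ps) u.length
          = bLoop rr (nB - u.length - 1) (PySem.Set.ofList (ps ++ cs)) (u.length + 1) := by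
        obtain ⟨nb', hnb⟩ : ∃ nb', nB - u.length = nb' + 1 := ⟨nB - u.length - 1, by omega⟩
        rw [hnb, pv_bLoop_expand hulen hgd hr, PySem.Set.ofList_append]
        norm_num
      have hLext : (PySem.Set.ofList (ps ++ cs) : List String)
          = (PySem.Set.ofList ps : List String) ++
            ((PySem.Set.ofList cs : List String).filter
              fun y => !(PySem.Set.contains (PySem.Set.ofList ps) y)) := by
        rw [PySem.Set.ofList_append, PySem.Set.update_eq_append_filter]
      have hp' : ∀ x ∈ ps ++ cs, x ∈ rr.flatMap (·.2) := by
        intro x hx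
        rcases List.mem_append.1 hx with h1 | h1
        · exact hpsub x h1
        · exact pv_mem_values hr x h1
      have hA' : pvUK rr ([color] ++ [c]) * (pvB0 rr + 1) + (pvF rr (ps ++ cs) ([color] ++ [c])).length ≤ m := by
        have hUKle := pv_UK_le rr ([color] ++ [c])
        have hF'nodup : (pvF rr (ps ++ cs) ([color] ++ [c])).Nodup := by
          unfold pvF PySem.Set.diff
          exact List.Nodup.filter _ (PySem.Set.nodup_ofList _)
        have hF'len : (pvF rr (ps ++ cs) ([color] ++ [c])).length ≤ pvB0 rr :=
          pv_nodup_le_B0 hF'nodup (fun x hx => hp' x (pv_mem_F.1 hx).1)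
        have h1 : pvUK rr ([color] ++ [c]) * (pvB0 rr + 1) ≤ pvUK rr [] * (pvB0 rr + 1) :=
          Nat.mul_le_mul_right _ hUKle
        omega
      have hdone' : ∀ x ∈ (PySem.Set.ofList (ps ++ cs) : List String).take (u.length + 1),
          x ∈ [color] ++ [c] ∨ pvLeaf rr x := by
        have htake : (PySem.Set.ofList (ps ++ cs) : List String).take (u.length + 1) = u ++ [c] := by
          rw [hLext, List.take_append_of_le_length (by omega), hofsplit,
            List.take_append, List.take_of_length_le (by omega)]
          have h1 : u.length + 1 - u.length = 1 := by omega
          rw [h1]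
          rfl
        rw [htake]
        intro x hx
        rcases List.mem_append.1 hx with h1 | h1
        · exact Or.inr (huleafs x h1)
        · simp at h1
          subst h1
          exact Or.inl (List.mem_append_right _ List.mem_cons_self)
      have habs' : ∀ x ∈ [color] ++ [c], pvNoop rr (PySem.Set.ofList (ps ++ cs)) x := by
        intro x hx qs hqs y hy
        rcases List.mem_append.1 hx with h1 | h1
        · simp at h1
          subst h1
          rw [hcolor] at hqs
          injection hqs with hqs
          subst hqs
          exact (PySem.Set.mem_ofList _ y).2 (List.mem_append_left _ hy)
        · simp at h1
          subst h1
          rw [hr] at hqs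
          injection hqs with hqs
          subst hqs
          exact (PySem.Set.mem_ofList _ y).2 (List.mem_append_right _ hy)
      have happ := pv_main rr m (ps ++ cs) ([color] ++ [c]) (pvF rr (ps ++ cs) ([color] ++ [c]))
        (u.length + 1) (nB - u.length - 1) hA' hp'
        (by rw [hLext]; simp; omega)
        hdone' habs'
        ⟨0, by simp, by simp⟩
        (by omega)
      have hstepA : aLoop rr (m+1) ps [color] (c :: rest)
          = aLoop rr m (ps ++ cs) ([color] ++ [c]) (pvF rr (ps ++ cs) ([color] ++ [c])) := by
        simp only [aLoop, hr]
        rfl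
      rw [hstepA, happ, ← hexp, ← hrun]

-- ===== VERDICT (by name: the statement is the Claim_ definition above) =====
theorem find_possible_parent_colors_spec : Claim_equal_find_possible_parent_colors := by
  intro color rr _
  unfold Spec_find_possible_parent_colors find_possible_parent_colors find_possible_parent_colors_alt
  cases h : pvRules rr color with
  | none => rfl
  | some ps =>
    have := pv_phase1 rr color ps h
      (ps.length + pvK rr * (pvB0 rr + 1) + pvB0 rr) 0 (pvB0 rr)
      (by simp)
      (by rw [pv_UK_nil]; omega)
      (le_refl _)
    simpa using this
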